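/- GENERATED by c/gen_decode.py: decode facts of the image, one per distinct instruction byte string. -/
import UserX.DecodeImage

#decode_all ProgX.Base.Dec
  "38d0"  -- cmp al,dl
  "480fafdd"  -- imul rbx,rbp
  "4885db"  -- test rbx,rbx
  "4889f7"  -- mov rdi,rsi
  "48c1e006"  -- shl rax,0x6
  "4989fd"  -- mov r13,rdi
  "4c8d6d0f"  -- lea r13,[rbp+0xf]
  "660f2fd1"  -- comisd xmm2,xmm1
  "7409"  -- je 100324
  "7633"  -- jbe 1023bd
  "81fb02fcffff"  -- cmp ebx,0xfffffc02
  "bb00000000"  -- mov ebx,0x0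
  "e844efffff"  -- call 1003c0
  "e8bef0ffff"  -- call 100300
  "eb0f"  -- jmp 100c15
  "f20f1005fbd90300"  -- movsd xmm0,QWORD PTR [rip+0x3d9fb]
  "f20f58c1"  -- addsd xmm0,xmm1
  "f20f59dc"  -- mulsd xmm3,xmm4
  "f20f5e1dc0e10300"  -- divsd xmm3,QWORD PTR [rip+0x3e1c0]
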